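-- pv_equiv track=rewrite | github.com/a-ungurianu/advent-of-code-2021 | day-4/python/solution.py | has_bingo
-- ===== SOURCE A (Python) =====
-- def has_bingo(board, drawn_numbers):
--     marked_numbers = []
--
--     def mark_number(number):
--         for rIdx, row in enumerate(board):
--             for cIdx, boardNumber in enumerate(row):
--                 if boardNumber == number:
--                     mark = (rIdx, cIdx, boardNumber)
--                     marked_numbers.append(mark)
--                     return mark
--         return None
--
--     def find_bingo_around(row, col):
--         if len(list(filter(lambda p: p[0] == row, marked_numbers))) == 5:
--             return True
--
--         if len(list(filter(lambda p: p[1] == col, marked_numbers))) == 5: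
--             return True
--         return False
--
--     for idx, number in enumerate(drawn_numbers):
--         mark = mark_number(number)
--         if mark:
--             if find_bingo_around(mark[0], mark[1]):
--                 return idx
--     return None
-- ===== SOURCE B (Python) =====
-- def has_bingo(board, drawn_numbers):
--     pos = {}
--     for r, row in enumerate(board):
--         for c, num in enumerate(row):
--             if num not in pos:
--                 pos[num] = (r, c)
--     row_counts = {}
--     col_counts = {}
--     for idx, number in enumerate(drawn_numbers):
--         if number in pos:
--             r, c = pos[number]
--             row_counts[r] = row_counts.get(r, 0) + 1
--             col_counts[c] = col_counts.get(c, 0) + 1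
--             if row_counts[r] == 5 or col_counts[c] == 5:
--                 return idx
--     return None
-- ===== Notes on version B (the rewrite author's own statement) =====
-- stated objective: faster
-- what changed: B precomputes a number->(row,col) dict of first occurrences and keeps two running row/col counters per draw, replacing A's full board rescan per draw and filter-count over a growing mark list.
import Mathlib
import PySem

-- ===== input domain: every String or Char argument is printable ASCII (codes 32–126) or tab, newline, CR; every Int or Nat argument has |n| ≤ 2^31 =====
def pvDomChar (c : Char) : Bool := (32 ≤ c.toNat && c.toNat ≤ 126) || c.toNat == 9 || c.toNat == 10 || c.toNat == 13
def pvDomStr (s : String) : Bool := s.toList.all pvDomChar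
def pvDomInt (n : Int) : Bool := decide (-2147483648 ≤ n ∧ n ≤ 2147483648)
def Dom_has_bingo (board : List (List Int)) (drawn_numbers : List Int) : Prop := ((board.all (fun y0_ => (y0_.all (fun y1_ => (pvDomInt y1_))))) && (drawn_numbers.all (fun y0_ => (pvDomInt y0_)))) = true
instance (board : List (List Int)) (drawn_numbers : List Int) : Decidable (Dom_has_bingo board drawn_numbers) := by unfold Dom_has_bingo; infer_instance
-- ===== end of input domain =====

-- B replaces A's per-draw rescan of the board and filter-count over a mark list by a
-- precomputed position dict and two running counters (idiomatic/faster; return value only).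

-- ===== PORT A =====
-- inner loop of mark_number over one enumerated row
def pvMarkRow (r : Int) (cells : List (Int × Int)) (number : Int) : Option (Int × Int × Int) :=
  match cells with
  | [] => none
  | (c, bn) :: rest => if bn = number then some (r, c, bn) else pvMarkRow r rest number

-- mark_number: first occurrence scan over enumerated rows
def pvMarkNumber (rows : List (Int × List Int)) (number : Int) : Option (Int × Int × Int) :=
  match rows with
  | [] => none
  | (r, row) :: rest =>
    match pvMarkRow r (PySem.List.enumerate row) number with
    | some m => some m
    | none => pvMarkNumber rest number

-- find_bingo_around over the marked_numbers list
def pvFindBingo (marked : List (Int × Int × Int)) (row col : Int) : Bool :=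
  if (marked.filter (fun p => p.1 == row)).length = 5 then true
  else if (marked.filter (fun p => p.2.1 == col)).length = 5 then true
  else false

-- the main for-loop, carrying the marked_numbers list
def pvLoopA (board : List (List Int)) (marked : List (Int × Int × Int)) (rest : List (Int × Int)) : Option Int :=
  match rest with
  | [] => none
  | (idx, n) :: rest' =>
    match pvMarkNumber (PySem.List.enumerate board) n with
    | none => pvLoopA board marked rest'
    | some (r, c, bn) =>
      let marked' := marked ++ [(r, c, bn)]
      if pvFindBingo marked' r c then some idx else pvLoopA board marked' rest'

def has_bingo (board : List (List Int)) (drawn_numbers : List Int) : Option Int :=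
  pvLoopA board [] (PySem.List.enumerate drawn_numbers)

-- ===== PORT B =====
-- build the number -> (row, col) dict, keeping the first occurrence
def pvBuildRow (pos : PySem.Dict Int (Int × Int)) (r : Int) (cells : List (Int × Int)) : PySem.Dict Int (Int × Int) :=
  match cells with
  | [] => pos
  | (c, num) :: rest =>
    pvBuildRow (if pos.contains num then pos else pos.insert num (r, c)) r rest

def pvBuildPos (pos : PySem.Dict Int (Int × Int)) (rows : List (Int × List Int)) : PySem.Dict Int (Int × Int) :=
  match rows with
  | [] => pos
  | (r, row) :: rest => pvBuildPos (pvBuildRow pos r (PySem.List.enumerate row)) rest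

-- the draw loop with the two counter dicts
def pvLoopB (pos : PySem.Dict Int (Int × Int)) (rc cc : PySem.Dict Int Int) (rest : List (Int × Int)) : Option Int :=
  match rest with
  | [] => none
  | (idx, n) :: rest' =>
    match pos.get? n with
    | none => pvLoopB pos rc cc rest'
    | some (r, c) =>
      let rc' := rc.insert r (rc.getD r 0 + 1)
      let cc' := cc.insert c (cc.getD c 0 + 1)
      if rc'.getD r 0 = 5 ∨ cc'.getD c 0 = 5 then some idx else pvLoopB pos rc' cc' rest'

def has_bingo_alt (board : List (List Int)) (drawn_numbers : List Int) : Option Int :=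
  pvLoopB (pvBuildPos PySem.Dict.empty (PySem.List.enumerate board))
          PySem.Dict.empty PySem.Dict.empty (PySem.List.enumerate drawn_numbers)

-- ===== PRECONDITION & SPEC =====
def Spec_has_bingo (board : List (List Int)) (drawn_numbers : List Int) (out : Option Int) : Prop := out = has_bingo_alt board drawn_numbers
instance (board : List (List Int)) (drawn_numbers : List Int) (out : Option Int) : Decidable (Spec_has_bingo board drawn_numbers out) := by unfold Spec_has_bingo; infer_instance

-- ===== CLAIM (what is proved, stated in full; the proofs are below) =====
def Claim_equal_has_bingo : Prop := ∀ (board : List (List Int)) (drawn_numbers : List Int), Dom_has_bingo board drawn_numbers → Spec_has_bingo board drawn_numbers (has_bingo board drawn_numbers)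

-- ===== LEMMAS AND PROOFS =====

-- the dict built by pvBuildRow holds the first occurrence: orElse of the accumulator
theorem buildRow_get? (cells : List (Int × Int)) (pos : PySem.Dict Int (Int × Int)) (r n : Int) :
    (pvBuildRow pos r cells).get? n =
      ((pos.get? n).orElse (fun _ => (pvMarkRow r cells n).map (fun m => (m.1, m.2.1)))) := by
  induction cells generalizing pos with
  | nil => cases h : pos.get? n <;> simp [pvBuildRow, pvMarkRow, Option.orElse, h]
  | cons hd tl ih =>
    obtain ⟨c, num⟩ := hd
    by_cases hn : num = n
    · subst hn
      by_cases hc : pos.contains num = true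
      · rcases h : pos.get? num with _ | v
        · exact absurd ((PySem.Dict.get?_eq_none_iff_contains pos num).mp h) (by simp [hc])
        · simp [pvBuildRow, hc, ih, h, Option.orElse]
      · have hv : pos.get? num = none :=
          (PySem.Dict.get?_eq_none_iff_contains pos num).mpr (by revert hc; cases pos.contains num <;> simp)
        simp [pvBuildRow, hc, ih, pvMarkRow, hv, Option.orElse, PySem.Dict.get?_insert_self]
    · have step : (if pos.contains num then pos else pos.insert num (r, c)).get? n = pos.get? n := by
        split
        · rfl
        · exact PySem.Dict.get?_insert_of_ne pos (r, c) (fun h => hn h.symm)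
      simp [pvBuildRow, ih, step, pvMarkRow, hn]

theorem buildPos_get? (rows : List (Int × List Int)) (pos : PySem.Dict Int (Int × Int)) (n : Int) :
    (pvBuildPos pos rows).get? n =
      ((pos.get? n).orElse (fun _ => (pvMarkNumber rows n).map (fun m => (m.1, m.2.1)))) := by
  induction rows generalizing pos with
  | nil => cases h : pos.get? n <;> simp [pvBuildPos, pvMarkNumber, Option.orElse, h]
  | cons hd tl ih =>
    obtain ⟨r, row⟩ := hd
    rw [pvBuildPos, ih, buildRow_get?]
    rcases h : pos.get? n with _ | v <;>
      rcases h2 : pvMarkRow r (PySem.List.enumerate row) n with _ | m <;>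
        simp [pvMarkNumber, h2, Option.orElse]

-- the counter invariant
def pvInv (marked : List (Int × Int × Int)) (rc cc : PySem.Dict Int Int) : Prop :=
  (∀ r : Int, rc.getD r 0 = ((marked.filter (fun p => p.1 == r)).length : Int)) ∧
  (∀ c : Int, cc.getD c 0 = ((marked.filter (fun p => p.2.1 == c)).length : Int))

theorem filter_append_single (marked : List (Int × Int × Int)) (f : Int × Int × Int → Bool) (x : Int × Int × Int) :
    ((marked ++ [x]).filter f).length = (marked.filter f).length + (if f x then 1 else 0) := by
  cases hfx : f x <;> simp [List.filter_append, List.filter, hfx]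

theorem loop_eq (board : List (List Int)) (pos : PySem.Dict Int (Int × Int))
    (hpos : ∀ n, pos.get? n = (pvMarkNumber (PySem.List.enumerate board) n).map (fun m => (m.1, m.2.1)))
    (rest : List (Int × Int)) (marked : List (Int × Int × Int)) (rc cc : PySem.Dict Int Int)
    (hinv : pvInv marked rc cc) :
    pvLoopA board marked rest = pvLoopB pos rc cc rest := by
  induction rest generalizing marked rc cc with
  | nil => rfl
  | cons hd rest' ih =>
    obtain ⟨idx, n⟩ := hd
    rcases h : pvMarkNumber (PySem.List.enumerate board) n with _ | ⟨r, c, bn⟩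
    · rw [pvLoopA, pvLoopB, h, hpos n, h]
      exact ih marked rc cc hinv
    · rw [pvLoopA, pvLoopB, h, hpos n, h]
      simp only [Option.map_some]
      obtain ⟨hr, hc⟩ := hinv
      have hinv' : pvInv (marked ++ [(r, c, bn)])
          (rc.insert r (rc.getD r 0 + 1)) (cc.insert c (cc.getD c 0 + 1)) := by
        constructor
        · intro r'
          rw [PySem.Dict.getD_insert, filter_append_single]
          by_cases hrr : r' = r
          · simp [hrr, hr r]
          · simp [hrr, hr r', Ne.symm hrr]
        · intro c'
          rw [PySem.Dict.getD_insert, filter_append_single]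
          by_cases hcc : c' = c
          · simp [hcc, hc c]
          · simp [hcc, hc c', Ne.symm hcc]
      have hA : pvFindBingo (marked ++ [(r, c, bn)]) r c = true ↔
          ((List.filter (fun p => p.1 == r) (marked ++ [(r, c, bn)])).length = 5 ∨
           (List.filter (fun p => p.2.1 == c) (marked ++ [(r, c, bn)])).length = 5) := by
        unfold pvFindBingo
        split_ifs with h1 h2
        · exact iff_of_true rfl (Or.inl h1)
        · exact iff_of_true rfl (Or.inr h2)
        · exact iff_of_false not_false (not_or.mpr ⟨h1, h2⟩)
      have hB : ((rc.insert r (rc.getD r 0 + 1)).getD r 0 = 5 ∨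
                 (cc.insert c (cc.getD c 0 + 1)).getD c 0 = 5) ↔
          ((List.filter (fun p => p.1 == r) (marked ++ [(r, c, bn)])).length = 5 ∨
           (List.filter (fun p => p.2.1 == c) (marked ++ [(r, c, bn)])).length = 5) := by
        rw [hinv'.1 r, hinv'.2 c]
        omega
      by_cases hb : pvFindBingo (marked ++ [(r, c, bn)]) r c = true
      · rw [if_pos hb, if_pos (hB.mpr (hA.mp hb))]
      · rw [if_neg hb, if_neg (fun hh => hb (hA.mpr (hB.mp hh)))]
        exact ih _ _ _ hinv'

-- ===== VERDICT (by name: the statement is the Claim_ definition above) =====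
theorem has_bingo_spec : Claim_equal_has_bingo := by
  intro board drawn_numbers _
  unfold Spec_has_bingo has_bingo has_bingo_alt
  refine loop_eq board _ (fun n => ?_) _ [] _ _ ⟨fun r => by simp, fun c => by simp⟩
  rw [buildPos_get?]
  simp [Option.orElse]
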